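-- pv_equiv track=rewrite | github.com/juius/tool-toad | tooltoad/xtb.py | md_normal_termination
-- ===== SOURCE A (Python) =====
-- def md_normal_termination(lines: list[str]) -> bool:
--     """Check if MD terminated normally."""
--     checks = {"normal_termination_md": False, "md_stable": True}
--     for line in reversed(lines):
--         if line.strip().startswith("normal exit of md()"):
--             checks["normal_termination_md"] = True
--         elif line.strip().startswith("MD is unstable, emergency exit"):
--             checks["md_stable"] = False
--     return checks
-- ===== SOURCE B (Python) =====
-- def md_normal_termination(lines: list[str]) -> bool:
--     """Check if MD terminated normally."""
--     normal = any(l.strip().startswith("normal exit of md()") for l in lines)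
--     unstable = any(l.strip().startswith("MD is unstable, emergency exit") for l in lines)
--     return {"normal_termination_md": normal, "md_stable": not unstable}
-- ===== Notes on version B (the rewrite author's own statement) =====
-- stated objective: idiomatic
-- what changed: Replaced the single reverse loop that mutates a dict in place through an if/elif chain by two independent forward any() scans, one per marker, building the result dict once at the end.
import Mathlib
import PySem

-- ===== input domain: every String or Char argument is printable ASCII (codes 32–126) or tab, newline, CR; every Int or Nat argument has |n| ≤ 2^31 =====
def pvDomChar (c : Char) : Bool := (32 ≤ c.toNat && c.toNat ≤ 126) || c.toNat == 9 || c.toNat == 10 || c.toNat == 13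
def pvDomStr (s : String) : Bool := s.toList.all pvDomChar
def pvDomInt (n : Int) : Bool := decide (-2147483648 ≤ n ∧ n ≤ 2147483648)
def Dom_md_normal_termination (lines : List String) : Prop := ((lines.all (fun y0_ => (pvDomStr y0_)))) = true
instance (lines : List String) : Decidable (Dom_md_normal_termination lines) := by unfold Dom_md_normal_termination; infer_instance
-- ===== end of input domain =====

-- B replaces A's fused reverse loop with in-place dict mutation by two independent forward any() scans (idiomatic decomposition); same return value.

-- ===== PORT A =====
def md_normal_termination (lines : List String) : List (String × Bool) :=
  (lines.reverse.foldl
    (fun checks line =>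
      if PySem.Str.startswith (PySem.Str.strip line) "normal exit of md()" then
        checks.insert "normal_termination_md" true
      else if PySem.Str.startswith (PySem.Str.strip line) "MD is unstable, emergency exit" then
        checks.insert "md_stable" false
      else checks)
    (PySem.Dict.ofList [("normal_termination_md", false), ("md_stable", true)])).items

-- ===== PORT B =====
def md_normal_termination_alt (lines : List String) : List (String × Bool) :=
  let normal := lines.any (fun l => PySem.Str.startswith (PySem.Str.strip l) "normal exit of md()")
  let unstable := lines.any (fun l => PySem.Str.startswith (PySem.Str.strip l) "MD is unstable, emergency exit")
  [("normal_termination_md", normal), ("md_stable", !unstable)]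

-- ===== PRECONDITION & SPEC =====
def Spec_md_normal_termination (lines : List String) (out : List (String × Bool)) : Prop := out = md_normal_termination_alt lines
instance (lines : List String) (out : List (String × Bool)) : Decidable (Spec_md_normal_termination lines out) := by unfold Spec_md_normal_termination; infer_instance

-- ===== CLAIM (what is proved, stated in full; the proofs are below) =====
def Claim_equal_md_normal_termination : Prop := ∀ (lines : List String), Dom_md_normal_termination lines → Spec_md_normal_termination lines (md_normal_termination lines)

-- ===== LEMMAS AND PROOFS =====

-- The two markers are mutually exclusive: no stripped line starts with both.
theorem md_excl (s : String)
    (h : PySem.Str.startswith (PySem.Str.strip s) "normal exit of md()" = true) :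
    PySem.Str.startswith (PySem.Str.strip s) "MD is unstable, emergency exit" = false := by
  rw [Bool.eq_false_iff]
  intro hc
  simp only [pysem, PySem.Chars.startswith_iff] at h hc
  rcases List.prefix_or_prefix_of_prefix h hc with hp | hp <;> revert hp <;> decide

theorem md_ins1 (a b : Bool) :
    (PySem.Dict.mk [("normal_termination_md", a), ("md_stable", b)]).insert "normal_termination_md" true
    = PySem.Dict.mk [("normal_termination_md", true), ("md_stable", b)] := by
  simp [PySem.Dict.insert, PySem.Dict.contains]

theorem md_ins2 (a b : Bool) :
    (PySem.Dict.mk [("normal_termination_md", a), ("md_stable", b)]).insert "md_stable" false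
    = PySem.Dict.mk [("normal_termination_md", a), ("md_stable", false)] := by
  simp [PySem.Dict.insert, PySem.Dict.contains]

-- Invariant of A's loop: starting from the two-key dict with values (a, b), the
-- fold yields key1 ↦ a || any-normal, key2 ↦ b && not-any-unstable.
theorem md_loop_items (L : List String) (a b : Bool) :
    (L.foldl
      (fun (checks : PySem.Dict String Bool) line =>
        if PySem.Str.startswith (PySem.Str.strip line) "normal exit of md()" then
          checks.insert "normal_termination_md" true
        else if PySem.Str.startswith (PySem.Str.strip line) "MD is unstable, emergency exit" then
          checks.insert "md_stable" false
        else checks)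
      (PySem.Dict.mk [("normal_termination_md", a), ("md_stable", b)])).items
    = [("normal_termination_md",
          a || L.any (fun l => PySem.Str.startswith (PySem.Str.strip l) "normal exit of md()")),
       ("md_stable",
          b && !(L.any (fun l => PySem.Str.startswith (PySem.Str.strip l) "MD is unstable, emergency exit")))] := by
  induction L generalizing a b with
  | nil => simp
  | cons x L ih =>
    simp only [List.foldl_cons, List.any_cons]
    by_cases h1 : PySem.Str.startswith (PySem.Str.strip x) "normal exit of md()" = true
    · rw [if_pos h1, md_ins1, ih, h1, md_excl x h1]
      simp
    · rw [if_neg h1]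
      rw [Bool.not_eq_true] at h1
      by_cases h2 : PySem.Str.startswith (PySem.Str.strip x) "MD is unstable, emergency exit" = true
      · rw [if_pos h2, md_ins2, ih, h1, h2]
        simp
      · rw [Bool.not_eq_true] at h2
        rw [if_neg (by rw [h2]; exact Bool.false_ne_true), ih, h1, h2]
        simp

-- ===== VERDICT (by name: the statement is the Claim_ definition above) =====
theorem md_normal_termination_spec : Claim_equal_md_normal_termination := by
  intro lines _
  unfold Spec_md_normal_termination md_normal_termination md_normal_termination_alt
  have hinit : PySem.Dict.ofList [("normal_termination_md", false), ("md_stable", true)]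
      = PySem.Dict.mk [("normal_termination_md", false), ("md_stable", true)] := by decide
  rw [hinit, md_loop_items]
  simp [List.any_reverse]
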